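-- pv_equiv track=rewrite | github.com/Git-Lekan-Balogun/codingportfolio | T24/T24 Task 1.py | hello_again
-- ===== SOURCE A (Python) =====
-- def hello_again(x):
--     # our function is called "hello_again" (which is kind of a play on words)
--     counter = 0
--     # our counter is used to dynamically iterate through our string, each loop it will increment, and we will use this to target every word
--     a = x.split()
--     # to target every word, we will split using the "space" as a delimiter
--     b = ""
--     # once we have our words in a list, we need to get them back into a string, this "b" value will hold an empty string ready to += our elements (words) back into
--     for i in a:
--         if counter % 2 == 0:
--             i = "hello"
--         # for each element, if the counter modulo by 2 is 0, this means its either a word, or the "each other" word, if its each other word, change the value of the element or word to "hello"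
--
--         b += i + " "
--         # append these values back into our empty string
--         counter += 1
--         # increment our counter so that we're consistently targeting every other word
--     return b
-- ===== SOURCE B (Python) =====
-- def hello_again(x):
--     a = x.split()
--     a[::2] = ["hello"] * len(a[::2])
--     return "".join(w + " " for w in a)
-- ===== Notes on version B (the rewrite author's own statement) =====
-- stated objective: simpler
-- what changed: Replaces the counter-and-modulo loop with a bulk strided slice assignment over the even indices followed by a single join; no per-element counter or branch remains.
import Mathlib
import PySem

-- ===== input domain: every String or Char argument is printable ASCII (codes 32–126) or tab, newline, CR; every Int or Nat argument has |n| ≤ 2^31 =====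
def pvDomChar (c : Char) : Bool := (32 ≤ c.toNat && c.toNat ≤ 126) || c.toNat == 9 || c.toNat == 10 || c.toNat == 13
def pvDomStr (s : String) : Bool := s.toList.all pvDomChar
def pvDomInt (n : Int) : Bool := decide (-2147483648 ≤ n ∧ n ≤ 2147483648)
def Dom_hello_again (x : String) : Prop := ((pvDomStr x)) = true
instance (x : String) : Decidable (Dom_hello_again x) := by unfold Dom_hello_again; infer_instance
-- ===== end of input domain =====

-- B rewrites A's counter-with-modulo loop as a bulk replacement of the even-indexed
-- words plus one join; same return value, stated objective: simpler.

-- ===== PORT A =====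
-- the loop body: if counter % 2 == 0: i = "hello";  b += i + " ";  counter += 1
def pvStepA (st : Nat × List Char) (i : List Char) : Nat × List Char :=
  (st.1 + 1, st.2 ++ ((if st.1 % 2 == 0 then "hello".toList else i) ++ [' ']))

def hello_again (x : String) : String :=
  String.mk (((PySem.Chars.split₀ x.toList).foldl pvStepA (0, ([] : List Char))).2)

-- ===== PORT B =====
-- a[::2] = ["hello"] * len(a[::2]) : overwrite positions 0,2,4,…
def pvFillEven : List (List Char) → List (List Char)
  | [] => []
  | [_] => ["hello".toList]
  | _ :: v :: rest => "hello".toList :: v :: pvFillEven rest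

def hello_again_alt (x : String) : String :=
  String.mk (PySem.Chars.join []
    ((pvFillEven (PySem.Chars.split₀ x.toList)).map (fun w => w ++ [' '])))

-- ===== PRECONDITION & SPEC =====
def Spec_hello_again (x : String) (out : String) : Prop := out = hello_again_alt x
instance (x : String) (out : String) : Decidable (Spec_hello_again x out) := by unfold Spec_hello_again; infer_instance

-- ===== CLAIM (what is proved, stated in full; the proofs are below) =====
def Claim_equal_hello_again : Prop := ∀ (x : String), Dom_hello_again x → Spec_hello_again x (hello_again x)

-- ===== LEMMAS AND PROOFS =====
lemma pv_join_cons (p : List Char) (L : List (List Char)) :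
    PySem.Chars.join [] (p :: L) = p ++ PySem.Chars.join [] L := by
  cases L with
  | nil => simp [PySem.Chars.join_singleton, PySem.Chars.join_nil]
  | cons q rest => simpa using PySem.Chars.join_cons_cons [] p q rest

lemma pv_loop (a : List (List Char)) : ∀ (c : Nat) (acc : List Char), c % 2 = 0 →
    (a.foldl pvStepA (c, acc)).2
      = acc ++ PySem.Chars.join [] ((pvFillEven a).map (fun w => w ++ [' '])) := by
  induction a using pvFillEven.induct with
  | case1 => intro c acc _; simp [pvFillEven, PySem.Chars.join_nil]
  | case2 w => intro c acc h; simp [pvFillEven, pvStepA, h, PySem.Chars.join_singleton]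
  | case3 w v rest ih =>
      intro c acc h
      have h1 : ¬ ((c + 1) % 2 = 0) := by omega
      have h2 : (c + 2) % 2 = 0 := by omega
      simp [pvFillEven, pvStepA, h, h1, pv_join_cons, ih (c + 2) _ h2]

-- ===== VERDICT (by name: the statement is the Claim_ definition above) =====
theorem hello_again_spec : Claim_equal_hello_again := by
  intro x _
  unfold Spec_hello_again hello_again hello_again_alt
  rw [pv_loop _ 0 [] rfl]
  simp
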